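-- pv_equiv track=rewrite | github.com/PonteIneptique/paramhtrs-extension | app/alignment.py | common_hapaxes_normalized
-- ===== SOURCE A (Python) =====
-- from collections import deque, Counter
--
-- def normalize(token: str) -> str:
--     return token.lower().replace("v", "u").replace("j", "i")
--
-- def common_hapaxes_normalized(raw: list[str], reg: list[str], max_distance: int) -> list[tuple[str, int, int]]:
--     raw_norm = [normalize(t) for t in raw]
--     reg_norm = [normalize(t) for t in reg]
--
--     results: list[tuple[str, int, int]] = []
--     j = 0
--     last_i, last_j =0, 0
--     dist = 0
--     for i, tok in enumerate(raw_norm):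
--         # suffix-aware counts
--         raw_suffix = raw_norm[i:]
--         reg_suffix = reg_norm[j:]
--
--         raw_counts = Counter(raw_suffix)
--         reg_counts = Counter(reg_suffix)
--
--         if raw_counts[tok] != 1 or reg_counts.get(tok) != 1:
--             continue
--
--         j = reg_norm[last_j:].index(tok) + last_j
--
--         if abs(i - j) <= (max_distance+dist):
--             results.append((tok, i, j))
--             last_j = j
--
--         j += 1
--         dist = abs(j-i)
--
--     return results
-- ===== SOURCE B (Python) =====
-- from bisect import bisect_left
--
--
-- def normalize(token: str) -> str:
--     return token.lower().replace("v", "u").replace("j", "i")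
--
--
-- def common_hapaxes_normalized(raw: list[str], reg: list[str], max_distance: int) -> list[tuple[str, int, int]]:
--     raw_norm = [normalize(t) for t in raw]
--     reg_norm = [normalize(t) for t in reg]
--
--     # precomputed indexes instead of per-iteration Counters/linear scans
--     last_raw: dict[str, int] = {}
--     for i, t in enumerate(raw_norm):
--         last_raw[t] = i
--     pos: dict[str, list[int]] = {}
--     for k, t in enumerate(reg_norm):
--         pos[t] = pos.get(t, []) + [k]
--
--     results: list[tuple[str, int, int]] = []
--     j = 0
--     last_j = 0
--     dist = 0
--     for i, tok in enumerate(raw_norm):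
--         if last_raw[tok] != i:
--             continue  # tok occurs again later in raw: not a suffix-hapax
--         ps = pos.get(tok, [])
--         if len(ps) - bisect_left(ps, j) != 1:
--             continue  # tok is not a hapax of reg_norm[j:]
--         j = ps[bisect_left(ps, last_j)]
--         if abs(i - j) <= max_distance + dist:
--             results.append((tok, i, j))
--             last_j = j
--         j += 1
--         dist = abs(j - i)
--     return results
-- ===== Notes on version B (the rewrite author's own statement) =====
-- stated objective: faster
-- what changed: B precomputes a last-occurrence index of raw and a per-token sorted position list of reg once, then answers each iteration's hapax tests with a dict lookup plus bisect instead of rebuilding suffix Counters and linearly scanning reg_norm with .index on every raw token.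
import Mathlib
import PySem

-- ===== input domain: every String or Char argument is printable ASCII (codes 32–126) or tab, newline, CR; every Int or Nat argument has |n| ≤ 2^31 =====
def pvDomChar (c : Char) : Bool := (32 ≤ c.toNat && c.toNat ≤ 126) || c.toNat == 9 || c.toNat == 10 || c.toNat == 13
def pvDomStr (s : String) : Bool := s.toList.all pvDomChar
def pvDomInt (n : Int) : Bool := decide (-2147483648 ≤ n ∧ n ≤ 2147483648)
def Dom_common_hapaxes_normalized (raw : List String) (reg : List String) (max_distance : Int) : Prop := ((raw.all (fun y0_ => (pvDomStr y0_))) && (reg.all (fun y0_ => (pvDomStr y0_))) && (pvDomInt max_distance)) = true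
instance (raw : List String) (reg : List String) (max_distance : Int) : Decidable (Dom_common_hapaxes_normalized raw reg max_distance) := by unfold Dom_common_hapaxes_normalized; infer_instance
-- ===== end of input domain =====

-- B replaces A's per-iteration suffix Counters and linear `.index` scan by precomputed
-- last-occurrence / position indexes queried with bisect (measured faster on large inputs).

-- shared module-level helper `normalize` (identical in Source A and Source B)
def pvNormalize (t : String) : String :=
  PySem.Str.replace (PySem.Str.replace (PySem.Str.lower t) "v" "u") "j" "i"

-- ===== PORT A =====
-- A's for-loop over enumerate(raw_norm); state (j, last_j, dist, results).
-- The `none` branch is Python's ValueError from `.index` (never reached: last_j ≤ j always holds,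
-- so the token found once in reg_norm[j:] also occurs in reg_norm[last_j:]).
def chnLoopA (rawN regN : List String) (md : Int) :
    List (Int × String) → Int → Int → Int → List (String × Int × Int) → List (String × Int × Int)
  | [], _, _, _, results => results
  | (i, tok) :: rest, j, lastj, dist, results =>
    let raw_suffix := PySem.List.slice rawN (some i) none
    let reg_suffix := PySem.List.slice regN (some j) none
    let raw_counts := PySem.Dict.counter raw_suffix
    let reg_counts := PySem.Dict.counter reg_suffix
    if raw_counts.getD tok 0 ≠ 1 ∨ reg_counts.get? tok ≠ some 1 then
      chnLoopA rawN regN md rest j lastj dist results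
    else
      match PySem.List.index? (PySem.List.slice regN (some lastj) none) tok with
      | none => results
      | some idx =>
        let j2 : Int := (idx : Int) + lastj
        if |i - j2| ≤ md + dist then
          chnLoopA rawN regN md rest (j2 + 1) j2 |j2 + 1 - i| (results ++ [(tok, i, j2)])
        else
          chnLoopA rawN regN md rest (j2 + 1) lastj |j2 + 1 - i| results

def common_hapaxes_normalized (raw : List String) (reg : List String) (max_distance : Int) : List (String × Int × Int) :=
  let raw_norm := raw.map pvNormalize
  let reg_norm := reg.map pvNormalize
  chnLoopA raw_norm reg_norm max_distance (PySem.List.enumerate raw_norm 0) 0 0 0 []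

-- ===== PORT B =====
-- Source B's `last_raw[t] = i` loop
def chnLastIdx (items : List (Int × String)) : PySem.Dict String Int :=
  items.foldl (fun d p => d.insert p.2 p.1) PySem.Dict.empty

-- Source B's `pos[t] = pos.get(t, []) + [k]` loop
def chnPosIdx (items : List (Int × String)) : PySem.Dict String (List Int) :=
  items.foldl (fun d p => d.insert p.2 (d.getD p.2 [] ++ [p.1])) PySem.Dict.empty

-- Source B's main loop; the `none` branch is Python's IndexError on ps[bisect_left(ps, last_j)]
-- (never reached, for the same reason as A's ValueError).
def chnLoopB (lastRaw : PySem.Dict String Int) (posD : PySem.Dict String (List Int)) (md : Int) :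
    List (Int × String) → Int → Int → Int → List (String × Int × Int) → List (String × Int × Int)
  | [], _, _, _, results => results
  | (i, tok) :: rest, j, lastj, dist, results =>
    if lastRaw.get? tok ≠ some i then
      chnLoopB lastRaw posD md rest j lastj dist results
    else
      let ps := posD.getD tok []
      if (ps.length : Int) - (PySem.List.bisectLeft ps j : Int) ≠ 1 then
        chnLoopB lastRaw posD md rest j lastj dist results
      else
        match PySem.List.pyGet? ps ((PySem.List.bisectLeft ps lastj : Nat) : Int) with
        | none => results
        | some j2 =>
          if |i - j2| ≤ md + dist then
            chnLoopB lastRaw posD md rest (j2 + 1) j2 |j2 + 1 - i| (results ++ [(tok, i, j2)])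
          else
            chnLoopB lastRaw posD md rest (j2 + 1) lastj |j2 + 1 - i| results

def common_hapaxes_normalized_alt (raw : List String) (reg : List String) (max_distance : Int) : List (String × Int × Int) :=
  let raw_norm := raw.map pvNormalize
  let reg_norm := reg.map pvNormalize
  chnLoopB (chnLastIdx (PySem.List.enumerate raw_norm 0)) (chnPosIdx (PySem.List.enumerate reg_norm 0))
    max_distance (PySem.List.enumerate raw_norm 0) 0 0 0 []

-- ===== PRECONDITION & SPEC =====
def Spec_common_hapaxes_normalized (raw : List String) (reg : List String) (max_distance : Int) (out : List (String × Int × Int)) : Prop := out = common_hapaxes_normalized_alt raw reg max_distance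
instance (raw : List String) (reg : List String) (max_distance : Int) (out : List (String × Int × Int)) : Decidable (Spec_common_hapaxes_normalized raw reg max_distance out) := by unfold Spec_common_hapaxes_normalized; infer_instance

-- ===== CLAIM (what is proved, stated in full; the proofs are below) =====
def Claim_equal_common_hapaxes_normalized : Prop := ∀ (raw : List String) (reg : List String) (max_distance : Int), Dom_common_hapaxes_normalized raw reg max_distance → Spec_common_hapaxes_normalized raw reg max_distance (common_hapaxes_normalized raw reg max_distance)

-- ===== LEMMAS AND PROOFS =====

-- positions of t in l, offset by k (proof-side characterisation of both programs' indexes)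
def posFrom (t : String) : List String → Int → List Int
  | [], _ => []
  | x :: xs, k => if x = t then k :: posFrom t xs (k + 1) else posFrom t xs (k + 1)

lemma length_posFrom (t : String) : ∀ (l : List String) (k : Int),
    (posFrom t l k).length = l.count t := by
  intro l; induction l with
  | nil => intro k; simp [posFrom]
  | cons x xs ih =>
    intro k
    by_cases h : x = t <;> simp [posFrom, h, ih]

lemma mem_posFrom_ge (t : String) : ∀ (l : List String) (k p : Int),
    p ∈ posFrom t l k → k ≤ p := by
  intro l; induction l with
  | nil => intro k p hp; simp [posFrom] at hp
  | cons x xs ih =>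
    intro k p hp
    by_cases h : x = t <;> simp [posFrom, h] at hp
    · rcases hp with rfl | hp
      · omega
      · have := ih (k + 1) p hp; omega
    · have := ih (k + 1) p hp; omega

lemma posFrom_eq_nil_iff (t : String) : ∀ (l : List String) (k : Int),
    posFrom t l k = [] ↔ t ∉ l := by
  intro l; induction l with
  | nil => intro k; simp [posFrom]
  | cons x xs ih =>
    intro k
    by_cases h : x = t
    · subst h; simp [posFrom]
    · have h' : t ≠ x := fun e => h e.symm
      simp [posFrom, h, ih, h']

lemma posFrom_append (t : String) : ∀ (l₁ l₂ : List String) (k : Int),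
    posFrom t (l₁ ++ l₂) k = posFrom t l₁ k ++ posFrom t l₂ (k + l₁.length) := by
  intro l₁; induction l₁ with
  | nil => intro l₂ k; simp [posFrom]
  | cons x xs ih =>
    intro l₂ k
    by_cases h : x = t <;> simp [posFrom, h, ih] <;> ring_nf

lemma posFrom_drop (t : String) : ∀ (l : List String) (m : Nat) (k : Int),
    posFrom t (l.drop m) (k + m) = (posFrom t l k).filter (fun p => decide (k + m ≤ p)) := by
  intro l; induction l with
  | nil => intro m k; simp [posFrom]
  | cons x xs ih =>
    intro m k
    cases m with
    | zero =>
      simp only [List.drop_zero, Nat.cast_zero, add_zero]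
      symm
      apply List.filter_eq_self.mpr
      intro p hp
      simpa using mem_posFrom_ge t (x :: xs) k p hp
    | succ n =>
      have hcast : k + ((n + 1 : Nat) : Int) = (k + 1) + (n : Int) := by push_cast; ring
      simp only [List.drop_succ_cons]
      rw [hcast, ih n (k + 1)]
      by_cases h : x = t
      · rw [show posFrom t (x :: xs) k = k :: posFrom t xs (k + 1) from by simp [posFrom, h]]
        rw [List.filter_cons]
        have hd : decide ((k + 1) + (n : Int) ≤ k) = false := by simp; omega
        rw [hd]
        simp
      · rw [show posFrom t (x :: xs) k = posFrom t xs (k + 1) from by simp [posFrom, h]]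

lemma pairwise_posFrom (t : String) : ∀ (l : List String) (k : Int),
    (posFrom t l k).Pairwise (· ≤ ·) := by
  intro l; induction l with
  | nil => intro k; simp [posFrom]
  | cons x xs ih =>
    intro k
    by_cases h : x = t <;> simp [posFrom, h, ih]
    intro p hp
    have := mem_posFrom_ge t xs (k + 1) p hp; omega

-- the length of takeWhile characterised by the elements it covers
lemma takeWhile_len_facts (q : Int → Bool) : ∀ (l : List Int),
    (l.takeWhile q).length ≤ l.length ∧
    (∀ j (hj : j < l.length), j < (l.takeWhile q).length → q l[j] = true) ∧
    (∀ hj : (l.takeWhile q).length < l.length, q (l[(l.takeWhile q).length]'hj) = false) := by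
  intro l; induction l with
  | nil => simp
  | cons x xs ih =>
    obtain ⟨ih1, ih2, ih3⟩ := ih
    cases hq : q x with
    | true =>
      refine ⟨?_, ?_, ?_⟩ <;> simp only [List.takeWhile_cons, hq, if_true, List.length_cons]
      · omega
      · intro j hj hlt
        cases j with
        | zero => simpa using hq
        | succ m => simpa using ih2 m (by simpa using hj) (by simpa using hlt)
      · intro hj
        simpa using ih3 (by simpa using hj)
    | false =>
      have htw : (x :: xs).takeWhile q = [] := by simp [hq]
      refine ⟨by simp [htw], by simp [htw], ?_⟩
      intro hj; simpa [htw] using hq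

lemma bisect_eq_takeWhile (ps : List Int) (x : Int) (hs : ps.Pairwise (· ≤ ·)) :
    PySem.List.bisectLeft ps x = (ps.takeWhile (fun p => decide (p < x))).length := by
  obtain ⟨h1, h2, h3⟩ := PySem.List.bisectLeft_spec ps x hs
  obtain ⟨t1, t2, t3⟩ := takeWhile_len_facts (fun p => decide (p < x)) ps
  set b := PySem.List.bisectLeft ps x with hb
  set tw := (ps.takeWhile (fun p => decide (p < x))).length with htw
  rcases Nat.lt_trichotomy b tw with h | h | h
  · have hblt : b < ps.length := by omega
    have := t2 b hblt h
    have := h3 b hblt (le_refl b)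
    simp at *; omega
  · exact h
  · have htlt : tw < ps.length := by omega
    have := h2 tw htlt h
    have := t3 htlt
    simp at *; omega

lemma dropWhile_posFrom (t : String) (x : Int) : ∀ (l : List String) (k : Int),
    (posFrom t l k).dropWhile (fun p => decide (p < x)) = (posFrom t l k).filter (fun p => decide (x ≤ p)) := by
  intro l; induction l with
  | nil => intro k; simp [posFrom]
  | cons y xs ih =>
    intro k
    by_cases h : y = t
    · rw [show posFrom t (y :: xs) k = k :: posFrom t xs (k + 1) from by simp [posFrom, h]]
      by_cases hk : k < x
      · rw [List.dropWhile_cons_of_pos (by simpa using hk), List.filter_cons,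
          show decide (x ≤ k) = false from by simp; omega]
        simpa using ih (k + 1)
      · rw [List.dropWhile_cons_of_neg (by simpa using hk), List.filter_cons,
          show decide (x ≤ k) = true from by simp; omega]
        congr 1
        symm
        apply List.filter_eq_self.mpr
        intro p hp
        have := mem_posFrom_ge t xs (k + 1) p hp
        simp; omega
    · rw [show posFrom t (y :: xs) k = posFrom t xs (k + 1) from by simp [posFrom, h]]
      exact ih (k + 1)

lemma index?_posFrom (t : String) : ∀ (l : List String) (k : Int),
    (PySem.List.index? l t).map (fun r : Nat => (r : Int) + k) = (posFrom t l k).head? := by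
  intro l; induction l with
  | nil =>
    intro k
    rw [show PySem.List.index? ([] : List String) t = none from
      (PySem.List.index?_eq_none_iff [] t).mpr (by simp)]
    simp [posFrom]
  | cons x xs ih =>
    intro k
    by_cases h : x = t
    · subst h
      rw [PySem.List.index?_cons_self]
      simp [posFrom]
    · rw [PySem.List.index?_cons_of_ne xs h,
        show posFrom t (x :: xs) k = posFrom t xs (k + 1) from by simp [posFrom, h]]
      rw [← ih (k + 1)]
      cases PySem.List.index? xs t <;> simp
      ring

lemma pyGet?_takeWhile (q : Int → Bool) : ∀ (ps : List Int),
    PySem.List.pyGet? ps (((ps.takeWhile q).length : Nat) : Int) = (ps.dropWhile q).head? := by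
  intro ps
  rw [PySem.List.pyGet?_natCast]
  induction ps with
  | nil => simp
  | cons x xs ih =>
    cases hq : q x with
    | true => simpa [List.dropWhile_cons, hq] using ih
    | false => simp [hq]

-- the last-occurrence dict of Source B reads back the last element of posFrom
lemma get?_lastIdx_aux (t : String) : ∀ (l : List String) (k : Int) (d : PySem.Dict String Int),
    ((PySem.List.enumerate l k).foldl (fun d p => d.insert p.2 p.1) d).get? t
      = ((posFrom t l k).getLast?).or (d.get? t) := by
  intro l; induction l with
  | nil => intro k d; simp [PySem.List.enumerate, posFrom]
  | cons x xs ih =>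
    intro k d
    rw [PySem.List.enumerate_cons]
    simp only [List.foldl_cons]
    rw [ih (k + 1) (d.insert x k)]
    by_cases h : x = t
    · subst h
      rw [PySem.Dict.get?_insert_self,
        show posFrom x (x :: xs) k = k :: posFrom x xs (k + 1) from by simp [posFrom]]
      cases hq : (posFrom x xs (k + 1)).getLast? with
      | none =>
        rw [List.getLast?_eq_none_iff.mp hq]
        simp
      | some p =>
        rw [show (k :: posFrom x xs (k + 1)).getLast? = some p from by
          rw [show k :: posFrom x xs (k + 1) = [k] ++ posFrom x xs (k + 1) from rfl,
            List.getLast?_append, hq]; rfl]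
        simp
    · have h' : t ≠ x := fun e => h e.symm
      rw [PySem.Dict.get?_insert_of_ne d k h',
        show posFrom t (x :: xs) k = posFrom t xs (k + 1) from by simp [posFrom, h]]

-- the positions dict of Source B reads back posFrom
lemma getD_posIdx_aux (t : String) : ∀ (l : List String) (k : Int) (d : PySem.Dict String (List Int)),
    ((PySem.List.enumerate l k).foldl (fun d p => d.insert p.2 (d.getD p.2 [] ++ [p.1])) d).getD t []
      = d.getD t [] ++ posFrom t l k := by
  intro l; induction l with
  | nil => intro k d; simp [PySem.List.enumerate, posFrom]
  | cons x xs ih =>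
    intro k d
    rw [PySem.List.enumerate_cons]
    simp only [List.foldl_cons]
    rw [ih (k + 1) _]
    by_cases h : x = t
    · subst h
      rw [show posFrom x (x :: xs) k = k :: posFrom x xs (k + 1) from by simp [posFrom],
        show (d.insert x (d.getD x [] ++ [k])).getD x [] = d.getD x [] ++ [k] from by
          simp [PySem.Dict.getD, PySem.Dict.get?_insert_self]]
      simp
    · have h' : t ≠ x := fun e => h e.symm
      rw [show (d.insert x (d.getD x [] ++ [k])).getD t [] = d.getD t [] from by
          simp [PySem.Dict.getD, PySem.Dict.get?_insert_of_ne d _ h'],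
        show posFrom t (x :: xs) k = posFrom t xs (k + 1) from by simp [posFrom, h]]

lemma option_ne_some_one (o : Option Int) : (o ≠ some 1) ↔ o.getD 0 ≠ 1 := by
  cases o <;> simp

-- the main loop equivalence
lemma chn_loop_eq (rawN regN : List String) (md : Int) :
    ∀ (s : List String) (i0 : Nat) (j lastj dist : Int) (res : List (String × Int × Int)),
      rawN.drop i0 = s → 0 ≤ j → 0 ≤ lastj →
      chnLoopA rawN regN md (PySem.List.enumerate s (i0 : Int)) j lastj dist res
        = chnLoopB (chnLastIdx (PySem.List.enumerate rawN 0)) (chnPosIdx (PySem.List.enumerate regN 0))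
            md (PySem.List.enumerate s (i0 : Int)) j lastj dist res := by
  intro s
  induction s with
  | nil => intro i0 j lastj dist res _ _ _; simp [PySem.List.enumerate, chnLoopA, chnLoopB]
  | cons tok s' ih =>
    intro i0 j lastj dist res hdrop hj hlj
    have hdrop' : rawN.drop (i0 + 1) = s' := by
      rw [← List.tail_drop, hdrop]
      rfl
    have hi0lt : i0 < rawN.length := by
      by_contra hc
      rw [List.drop_eq_nil_of_le (by omega)] at hdrop
      exact (List.cons_ne_nil _ _) hdrop.symm
    -- condition 1, A side: tok recurs in the raw suffix
    have hA1 : ((PySem.Dict.counter (PySem.List.slice rawN (some (i0 : Int)) none)).getD tok 0 ≠ 1)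
        ↔ tok ∈ s' := by
      rw [show PySem.List.slice rawN (some (i0 : Int)) none = rawN.drop i0 from
        PySem.List.slice_from_natCast rawN i0, hdrop, PySem.Dict.getD_counter]
      rw [List.count_cons_self]
      constructor
      · intro hne
        by_contra hmem
        rw [List.count_eq_zero.mpr hmem] at hne
        exact hne (by norm_num)
      · intro hmem heq
        have : (0 : Int) < (s'.count tok : Int) := by exact_mod_cast List.count_pos_iff.mpr hmem
        omega
    -- condition 1, B side
    have hB1 : ((chnLastIdx (PySem.List.enumerate rawN 0)).get? tok ≠ some (i0 : Int)) ↔ tok ∈ s' := by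
      unfold chnLastIdx
      rw [get?_lastIdx_aux tok rawN 0 PySem.Dict.empty, PySem.Dict.get?_empty, Option.or_none]
      have hsplit : rawN = rawN.take i0 ++ (tok :: s') := by rw [← hdrop, List.take_append_drop]
      have hlen : (rawN.take i0).length = i0 := by simp; omega
      have hpf : posFrom tok rawN 0 = posFrom tok (rawN.take i0) 0 ++ ((i0 : Int) :: posFrom tok s' ((i0 : Int) + 1)) := by
        conv_lhs => rw [hsplit]
        rw [posFrom_append, hlen]
        simp [posFrom]
      rw [hpf, List.getLast?_append]
      by_cases hmem : tok ∈ s'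
      · simp only [hmem, iff_true]
        have hQ : posFrom tok s' ((i0 : Int) + 1) ≠ [] := by
          intro hnil; exact (posFrom_eq_nil_iff tok s' _).mp hnil hmem
        obtain ⟨p, hp⟩ := Option.ne_none_iff_exists'.mp
          (fun hnone => hQ (List.getLast?_eq_none_iff.mp hnone))
        have hple : (i0 : Int) + 1 ≤ p :=
          mem_posFrom_ge tok s' _ p (List.mem_of_getLast? hp)
        rw [show ((i0 : Int) :: posFrom tok s' ((i0 : Int) + 1)).getLast? = some p from by
          rw [show (i0 : Int) :: posFrom tok s' ((i0 : Int) + 1) = [(i0 : Int)] ++ posFrom tok s' ((i0 : Int) + 1) from rfl,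
            List.getLast?_append, hp]; rfl]
        simp only [Option.some_or, ne_eq, Option.some.injEq]
        omega
      · simp only [hmem, iff_false, not_not]
        rw [(posFrom_eq_nil_iff tok s' _).mpr hmem]
        simp
    -- condition 2: tok is a hapax of the reg suffix; both sides equal "count ≠ 1"
    have hps : (chnPosIdx (PySem.List.enumerate regN 0)).getD tok [] = posFrom tok regN 0 := by
      unfold chnPosIdx
      rw [getD_posIdx_aux tok regN 0 PySem.Dict.empty]
      simp [PySem.Dict.getD, PySem.Dict.get?_empty]
    have hfilter : ∀ x : Int, 0 ≤ x →
        posFrom tok (regN.drop x.toNat) x = (posFrom tok regN 0).filter (fun p => decide (x ≤ p)) := by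
      intro x hx
      have := posFrom_drop tok regN x.toNat 0
      rw [zero_add, Int.toNat_of_nonneg hx] at this
      exact this
    have hcnt : ((regN.drop j.toNat).count tok : Int)
        = ((posFrom tok regN 0).filter (fun p => decide (j ≤ p))).length := by
      rw [← hfilter j hj, length_posFrom]
    have hsplitlen : ∀ x : Int,
        ((posFrom tok regN 0).takeWhile (fun p => decide (p < x))).length
          + ((posFrom tok regN 0).filter (fun p => decide (x ≤ p))).length
        = (posFrom tok regN 0).length := by
      intro x
      rw [← dropWhile_posFrom]
      conv_rhs => rw [← List.takeWhile_append_dropWhile (p := fun p => decide (p < x)) (l := posFrom tok regN 0)]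
      rw [List.length_append]
    have hbis : ∀ x : Int, PySem.List.bisectLeft (posFrom tok regN 0) x
        = ((posFrom tok regN 0).takeWhile (fun p => decide (p < x))).length := by
      intro x
      exact bisect_eq_takeWhile _ x (pairwise_posFrom tok regN 0)
    have hA2 : ((PySem.Dict.counter (PySem.List.slice regN (some j) none)).get? tok ≠ some 1)
        ↔ ((regN.drop j.toNat).count tok : Int) ≠ 1 := by
      rw [option_ne_some_one, PySem.List.slice_from regN hj]
      rw [show ((PySem.Dict.counter (List.drop j.toNat regN)).get? tok).getD 0
            = (PySem.Dict.counter (List.drop j.toNat regN)).getD tok 0 from rfl,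
        PySem.Dict.getD_counter]
    have hB2 : (((posFrom tok regN 0).length : Int) - (PySem.List.bisectLeft (posFrom tok regN 0) j : Int) ≠ 1)
        ↔ ((regN.drop j.toNat).count tok : Int) ≠ 1 := by
      rw [hbis j, hcnt]
      have := hsplitlen j
      omega
    -- the index computation agrees
    have hIdx : PySem.List.pyGet? (posFrom tok regN 0) ((PySem.List.bisectLeft (posFrom tok regN 0) lastj : Nat) : Int)
        = (PySem.List.index? (regN.drop lastj.toNat) tok).map (fun r : Nat => (r : Int) + lastj) := by
      rw [hbis lastj, pyGet?_takeWhile, dropWhile_posFrom, ← hfilter lastj hlj]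
      rw [← index?_posFrom tok (regN.drop lastj.toNat) lastj]
    -- unfold one step of both loops
    rw [PySem.List.enumerate_cons]
    simp only [chnLoopA, chnLoopB, hps]
    rw [PySem.List.slice_from regN hlj]
    have hstep : ∀ (j' lastj' dist' : Int) (res' : List (String × Int × Int)), 0 ≤ j' → 0 ≤ lastj' →
        chnLoopA rawN regN md (PySem.List.enumerate s' ((i0 : Int) + 1)) j' lastj' dist' res'
          = chnLoopB (chnLastIdx (PySem.List.enumerate rawN 0)) (chnPosIdx (PySem.List.enumerate regN 0))
              md (PySem.List.enumerate s' ((i0 : Int) + 1)) j' lastj' dist' res' := by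
      intro j' lastj' dist' res' hj' hlj'
      have hc : ((i0 : Int) + 1) = ((i0 + 1 : Nat) : Int) := by push_cast; ring
      rw [hc]
      exact ih (i0 + 1) j' lastj' dist' res' hdrop' hj' hlj'
    by_cases c1 : tok ∈ s'
    · rw [if_pos (Or.inl (hA1.mpr c1)), if_pos (hB1.mpr c1)]
      exact hstep j lastj dist res hj hlj
    · rw [if_neg (fun h => c1 (hB1.mp h))]
      by_cases c2 : ((regN.drop j.toNat).count tok : Int) ≠ 1
      · rw [if_pos (Or.inr (hA2.mpr c2)), if_pos (hB2.mpr c2)]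
        exact hstep j lastj dist res hj hlj
      · rw [if_neg (by
            intro hor
            rcases hor with h1 | h2
            · exact c1 (hA1.mp h1)
            · exact c2 (hA2.mp h2)),
          if_neg (fun h => c2 (hB2.mp h))]
        rw [hIdx]
        cases hidx : PySem.List.index? (regN.drop lastj.toNat) tok with
        | none => rfl
        | some idx =>
          simp only [Option.map_some]
          by_cases hd : |(i0 : Int) - ((idx : Int) + lastj)| ≤ md + dist
          · rw [if_pos hd]; rw [if_pos hd]
            exact hstep _ _ _ _ (by omega) (by omega)
          · rw [if_neg hd]; rw [if_neg hd]
            exact hstep _ _ _ _ (by omega) hlj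

-- ===== VERDICT (by name: the statement is the Claim_ definition above) =====
theorem common_hapaxes_normalized_spec : Claim_equal_common_hapaxes_normalized := by
  intro raw reg md _
  unfold Spec_common_hapaxes_normalized
  unfold common_hapaxes_normalized common_hapaxes_normalized_alt
  have h := chn_loop_eq (raw.map pvNormalize) (reg.map pvNormalize) md
    (raw.map pvNormalize) 0 0 0 0 [] rfl le_rfl le_rfl
  simpa using h
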